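-- pv_equiv track=rewrite | github.com/collinsakenga/codewars_solutions | 3 kyu/Calculator.py | extract_left
-- ===== SOURCE A (Python) =====
-- def extract_left(string, cal):
--     index=len(string)
--     flag=False
--     for j,i in enumerate(string):
--         if i in "+-*/":
--             if not flag and (string[0]=="-"):
--                 flag=True
--                 continue
--             else:
--                 index=j
--                 break
--     return string[:index] if len(string)>1 else string[:index]
-- ===== SOURCE B (Python) =====
-- import re
--
-- def extract_left(string, cal):
--     # optional single leading minus, then a maximal run of non-operator chars
--     return re.match(r'-?[^+\-*/]*', string).group()
-- ===== Notes on version B (the rewrite author's own statement) =====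
-- stated objective: idiomatic
-- what changed: The index/flag scanning loop with break is replaced by a single regex match '-?[^+\-*/]*' (one optional leading minus, then a maximal run of non-operator characters).
import Mathlib
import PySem

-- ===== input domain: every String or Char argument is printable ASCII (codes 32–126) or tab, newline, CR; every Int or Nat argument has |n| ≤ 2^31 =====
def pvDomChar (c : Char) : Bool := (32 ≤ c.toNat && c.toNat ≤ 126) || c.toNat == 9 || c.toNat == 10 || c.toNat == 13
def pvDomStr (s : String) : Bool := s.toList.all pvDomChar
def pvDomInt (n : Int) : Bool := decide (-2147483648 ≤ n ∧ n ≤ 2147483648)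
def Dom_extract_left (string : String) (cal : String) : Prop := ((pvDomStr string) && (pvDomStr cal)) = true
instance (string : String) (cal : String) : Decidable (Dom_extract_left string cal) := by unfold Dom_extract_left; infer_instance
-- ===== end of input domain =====

-- B replaces A's index/flag scanning loop by a regex-style match: one optional
-- leading '-', then a maximal run of non-operator characters (idiomatic one-liner).


-- ===== PORT A =====
-- is i an operator character ('i in "+-*/"')
def pvIsOp (c : Char) : Bool := c == '+' || c == '-' || c == '*' || c == '/'

-- the for-loop of A: walks the remaining characters with counter j and the flag;
-- returns the index A ends with (len(string) when the loop never breaks).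
def pvLoopA (s0 : List Char) : List Char → Nat → Bool → Nat
  | [], _, _ => s0.length
  | c :: rest, j, flag =>
    if pvIsOp c then
      if !flag && (s0.head? == some '-') then pvLoopA s0 rest (j + 1) true
      else j
    else pvLoopA s0 rest (j + 1) flag

def extract_left (string : String) (cal : String) : String :=
  let cs := string.toList
  let index := pvLoopA cs cs 0 false
  -- string[:index] with 0 ≤ index ≤ len(string) is exactly 'take index'
  if cs.length > 1 then String.mk (cs.take index) else String.mk (cs.take index)

-- ===== PORT B =====
-- re.match(r'-?[^+\-*/]*', string).group(): optional single leading '-', then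
-- the maximal run of non-operator characters (hand port of the regex; exact here).
def extract_left_alt (string : String) (cal : String) : String :=
  match string.toList with
  | '-' :: rest => String.mk ('-' :: rest.takeWhile (fun c => !pvIsOp c))
  | cs => String.mk (cs.takeWhile (fun c => !pvIsOp c))

-- ===== PRECONDITION & SPEC =====
def Spec_extract_left (string : String) (cal : String) (out : String) : Prop := out = extract_left_alt string cal
instance (string : String) (cal : String) (out : String) : Decidable (Spec_extract_left string cal out) := by unfold Spec_extract_left; infer_instance

-- ===== CLAIM (what is proved, stated in full; the proofs are below) =====
def Claim_equal_extract_left : Prop := ∀ (string : String) (cal : String), Dom_extract_left string cal → Spec_extract_left string cal (extract_left string cal)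

-- ===== LEMMAS AND PROOFS =====
-- Once the skip-one-minus step cannot fire again (flag is true, or the head is not '-'),
-- taking pvLoopA's index out of s0 = pre ++ l (j = pre.length) yields pre ++ takeWhile.
theorem pvLoopA_take (s0 : List Char) (l pre : List Char) (flag : Bool)
    (hs : s0 = pre ++ l)
    (h : flag = true ∨ ¬ (s0.head? == some '-') = true) :
    s0.take (pvLoopA s0 l pre.length flag) = pre ++ l.takeWhile (fun c => !pvIsOp c) := by
  induction l generalizing pre flag with
  | nil =>
    simp [pvLoopA, hs]
  | cons c rest ih =>
    by_cases hc : pvIsOp c = true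
    · have hcond : (!flag && (s0.head? == some '-')) = false := by
        rcases h with h | h
        · simp [h]
        · simp only [Bool.not_eq_true] at h ⊢
          simp [h]
      rw [pvLoopA]
      simp only [hc, if_true, hcond, Bool.false_eq_true, if_false]
      simp [hs, hc]
    · have hc' : pvIsOp c = false := by simpa using hc
      rw [pvLoopA]
      simp only [hc', Bool.false_eq_true, if_false]
      have hlen : pre.length + 1 = (pre ++ [c]).length := by simp
      have := ih (pre ++ [c]) flag (by simp [hs]) h
      rw [hlen]
      rw [this]
      simp [hc']

theorem extract_left_eq (string cal : String) :
    extract_left string cal = extract_left_alt string cal := by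
  unfold extract_left extract_left_alt
  cases hcs : string.toList with
  | nil => simp [pvLoopA]
  | cons c rest =>
    by_cases hm : c = '-'
    · subst hm
      -- first iteration hits the '-' at index 0 and sets the flag
      have h1 : pvLoopA ('-' :: rest) ('-' :: rest) 0 false
          = pvLoopA ('-' :: rest) rest 1 true := by
        simp [pvLoopA, pvIsOp]
      have h2 := pvLoopA_take ('-' :: rest) rest ['-'] true rfl (Or.inl rfl)
      simp only [List.length_cons, List.length_nil] at h2
      split <;> simp_all
    · have h2 := pvLoopA_take (c :: rest) (c :: rest) [] false rfl
        (Or.inr (by simp [hm]))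
      simp only [List.length_nil] at h2
      split <;> simp_all

-- ===== VERDICT (by name: the statement is the Claim_ definition above) =====
theorem extract_left_spec : Claim_equal_extract_left := by
  intro string cal _
  exact extract_left_eq string cal
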